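-- pv_equiv track=rewrite | github.com/xsetra/Python | WhiteBlackRecursive/main.py | s
-- ===== SOURCE A (Python) =====
-- def s(sayi, dizi):
--     if sayi == 0:
--         return 1
--     elif sayi == 1:
--         return len(dizi)
--     else:
--         limit = len(dizi) - sayi
--         i = 0
--         toplam = 0
--         for l in range(limit):
--             dizi[i] = 0
--             dizi[i+1] = 1
--             new_dizi = dizi[i+2:]
--             toplam += s(sayi-1, new_dizi)
--             i += 1
--         return toplam
-- ===== SOURCE B (Python) =====
-- def s(sayi, dizi):
--     # closed form: the count equals the binomial coefficient C(len(dizi) - sayi + 1, sayi)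
--     n = len(dizi)
--     top = n - sayi + 1
--     if top < sayi:
--         return 0
--     c = 1
--     for j in range(sayi):
--         c = c * (top - j) // (j + 1)
--     return c
-- ===== Notes on version B (the rewrite author's own statement) =====
-- stated objective: alternative
-- what changed: replaced the recursive summation over suffixes by the closed-form binomial coefficient C(len(dizi)-sayi+1, sayi) computed with a single multiplicative loop of sayi steps
import Mathlib
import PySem

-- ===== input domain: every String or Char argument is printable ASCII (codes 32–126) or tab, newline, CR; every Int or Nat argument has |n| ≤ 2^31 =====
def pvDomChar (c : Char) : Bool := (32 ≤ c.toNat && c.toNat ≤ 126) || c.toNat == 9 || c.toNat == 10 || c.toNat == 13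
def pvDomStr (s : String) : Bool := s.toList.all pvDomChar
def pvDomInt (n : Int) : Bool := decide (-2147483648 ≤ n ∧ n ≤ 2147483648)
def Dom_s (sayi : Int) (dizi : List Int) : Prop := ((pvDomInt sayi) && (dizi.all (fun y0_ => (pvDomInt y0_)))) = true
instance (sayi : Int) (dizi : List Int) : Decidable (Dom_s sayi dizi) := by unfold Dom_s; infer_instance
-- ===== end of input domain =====

-- B computes the closed-form binomial C(len(dizi)-sayi+1, sayi) by a multiplicative loop instead of A's recursive summation over suffixes.
-- (Python A mutates `dizi` in place; the equivalence proved here is about the return value only.)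

-- ===== PORT A =====
-- The in-place writes dizi[i]=0, dizi[i+1]=1 touch only positions < i+2, so the slice
-- dizi[i+2:] passed to the recursive call equals the corresponding suffix of the original list.
def s (sayi : Int) (dizi : List Int) : Int :=
  if sayi = 0 then 1
  else if sayi = 1 then (dizi.length : Int)
  else if sayi < 0 then 0  -- Python raises IndexError for negative sayi (outside Pre_s); totalizing guard
  else
    (PySem.List.pyRange 0 ((dizi.length : Int) - sayi) 1).foldl
      (fun toplam i => toplam + s (sayi - 1) (PySem.List.slice dizi (some (i + 2)) none)) 0
termination_by sayi.toNat
decreasing_by omega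

-- ===== PORT B =====
def s_alt (sayi : Int) (dizi : List Int) : Int :=
  let n : Int := dizi.length
  let top : Int := n - sayi + 1
  if top < sayi then 0
  else
    (PySem.List.pyRange 0 sayi 1).foldl
      (fun c j => PySem.Int.floordiv (c * (top - j)) (j + 1)) 1

-- ===== PRECONDITION & SPEC =====
-- Pre_s excludes negative sayi, on which the Python A raises IndexError.
def Pre_s (sayi : Int) (dizi : List Int) : Prop := 0 ≤ sayi
instance (sayi : Int) (dizi : List Int) : Decidable (Pre_s sayi dizi) := by unfold Pre_s; infer_instance
def pvWitness_s : Int × List Int := (2, [5, 3, 7, 1, 4])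
def Spec_s (sayi : Int) (dizi : List Int) (out : Int) : Prop := out = s_alt sayi dizi
instance (sayi : Int) (dizi : List Int) (out : Int) : Decidable (Spec_s sayi dizi out) := by unfold Spec_s; infer_instance

-- ===== CLAIM (what is proved, stated in full; the proofs are below) =====
def Claim_equal_s : Prop := ∀ (sayi : Int) (dizi : List Int), Dom_s sayi dizi → Pre_s sayi dizi → Spec_s sayi dizi (s sayi dizi)

-- ===== LEMMAS AND PROOFS =====

-- hockey stick, list form: Σ_{i<m} C(m-i, r+1) = C(m+1, r+2)
theorem pv_hockey (r m : Nat) :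
    (((List.range m).map (fun i => ((Nat.choose (m - i) (r+1) : Nat) : Int))).sum)
      = ((Nat.choose (m+1) (r+2) : Nat) : Int) := by
  induction m with
  | zero => simp [Nat.choose_eq_zero_of_lt]
  | succ m ih =>
    rw [List.range_succ_eq_map]
    simp only [List.map_cons, List.map_map, List.sum_cons]
    have : ((List.range m).map (Function.comp (fun i => ((Nat.choose (m + 1 - i) (r+1) : Nat) : Int)) (fun i => i + 1)))
        = (List.range m).map (fun i => ((Nat.choose (m - i) (r+1) : Nat) : Int)) := by
      apply List.map_congr_left
      intro i hi
      simp only [Function.comp]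
      congr 2
      omega
    rw [this, ih]
    have h := Nat.choose_succ_succ' (m+1) (r+1)
    push_cast [h]
    ring

-- A computes C(n+1-k, k) (Nat-truncated subtraction), for every nonnegative sayi = k
theorem pv_s_eq_choose : ∀ (k : Nat) (dizi : List Int),
    s (k : Int) dizi = ((Nat.choose (dizi.length + 1 - k) k : Nat) : Int) := by
  intro k
  induction k using Nat.strong_induction_on with
  | _ k ih =>
    intro dizi
    match k with
    | 0 => simp [s]
    | 1 => simp [s]
    | (r+2) =>
      rw [s]
      have h0 : ¬ ((r+2 : Nat) : Int) = 0 := by omega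
      have h1 : ¬ ((r+2 : Nat) : Int) = 1 := by omega
      have h2 : ¬ ((r+2 : Nat) : Int) < 0 := by omega
      rw [if_neg h0, if_neg h1, if_neg h2]
      have hrec : ∀ (i : Int), i ∈ PySem.List.pyRange 0 ((dizi.length : Int) - ((r+2 : Nat) : Int)) 1 →
          ∀ acc : Int, acc + s (((r+2 : Nat) : Int) - 1) (PySem.List.slice dizi (some (i + 2)) none)
            = acc + ((Nat.choose (dizi.length - i.toNat - 2 - r) (r+1) : Nat) : Int) := by
        intro i hi acc
        rw [PySem.List.mem_pyRange_one] at hi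
        have hi0 : 0 ≤ i := hi.1
        have hcast : (((r+2 : Nat) : Int) - 1) = ((r+1 : Nat) : Int) := by push_cast; ring
        have hslice : PySem.List.slice dizi (some (i + 2)) none = dizi.drop (i+2).toNat :=
          PySem.List.slice_from _ (by omega)
        rw [hcast, hslice, ih (r+1) (by omega)]
        have hlen : (dizi.drop (i+2).toNat).length = dizi.length - (i+2).toNat :=
          List.length_drop
        rw [hlen]
        have harg : dizi.length - (i+2).toNat + 1 - (r+1) = dizi.length - i.toNat - 2 - r := by
          omega
        rw [harg]
      rw [PySem.List.foldl_congr_mem' _ _ _ _ hrec, PySem.List.foldl_add]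
      rw [PySem.List.pyRange_one]
      simp only [zero_add, List.map_map, Int.sub_zero]
      set m : Nat := ((dizi.length : Int) - ((r+2:Nat) : Int)).toNat with hm
      have hfun : ((List.range m).map (Function.comp (fun i => ((Nat.choose (dizi.length - i.toNat - 2 - r) (r+1) : Nat) : Int)) (fun k : Nat => (k : Int))))
          = (List.range m).map (fun i => ((Nat.choose (m - i) (r+1) : Nat) : Int)) := by
        apply List.map_congr_left
        intro i hi
        simp only [Function.comp, Int.toNat_natCast]
        have hi' : i < m := List.mem_range.mp hi
        have harg : dizi.length - i - 2 - r = m - i := by omega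
        rw [harg]
      rw [hfun, pv_hockey r m]
      rcases le_or_gt dizi.length (r+1) with hle | hgt
      · have hm0 : m = 0 := by omega
        rw [hm0, Nat.choose_eq_zero_of_lt (by omega), Nat.choose_eq_zero_of_lt (by omega)]
      · have harg : m + 1 = dizi.length + 1 - (r+2) := by omega
        rw [harg]

-- the multiplicative loop computes the binomial coefficient: after k steps, c = C(t, k)
theorem pv_prod_choose (t : Nat) : ∀ (k : Nat), k ≤ t →
    (PySem.List.pyRange 0 (k : Int) 1).foldl
      (fun c j => PySem.Int.floordiv (c * ((t : Int) - j)) (j + 1)) 1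
      = ((Nat.choose t k : Nat) : Int) := by
  intro k
  induction k with
  | zero =>
    intro _
    rw [show ((0:Nat):Int) = 0 from rfl, PySem.List.pyRange_one_eq_nil (by omega)]
    simp
  | succ k ih =>
    intro hk
    have hsplit : PySem.List.pyRange 0 ((k+1 : Nat) : Int) 1
        = PySem.List.pyRange 0 (k : Int) 1 ++ [(k : Int)] := by
      have : ((k+1 : Nat) : Int) = (k : Int) + 1 := by push_cast; ring
      rw [this, PySem.List.pyRange_one_succ_right (by omega)]
    rw [hsplit, List.foldl_append, ih (by omega)]
    simp only [List.foldl_cons, List.foldl_nil]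
    have hsub : (t : Int) - (k : Int) = ((t - k : Nat) : Int) := by omega
    have hmul : (Nat.choose t k) * (t - k) = (Nat.choose t (k+1)) * (k+1) :=
      (Nat.choose_succ_right_eq t k).symm
    have h1 : ((Nat.choose t k : Nat) : Int) * ((t : Int) - (k : Int))
        = ((Nat.choose t (k+1) * (k+1) : Nat) : Int) := by
      rw [hsub]; push_cast [← hmul]; ring
    rw [h1]
    have h2 : ((k : Int) + 1) = ((k+1 : Nat) : Int) := by push_cast; ring
    rw [h2, PySem.Int.floordiv_natCast]
    congr 1
    exact Nat.mul_div_cancel _ (by omega)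

-- B computes the same C(n+1-k, k)
theorem pv_s_alt_eq_choose : ∀ (k : Nat) (dizi : List Int),
    s_alt (k : Int) dizi = ((Nat.choose (dizi.length + 1 - k) k : Nat) : Int) := by
  intro k dizi
  unfold s_alt
  simp only
  by_cases h : (dizi.length : Int) - (k : Int) + 1 < (k : Int)
  · rw [if_pos h]
    have : dizi.length + 1 - k < k := by omega
    rw [Nat.choose_eq_zero_of_lt this]
    simp
  · rw [if_neg h]
    have hk : k ≤ dizi.length + 1 - k := by omega
    have ht : (dizi.length : Int) - (k : Int) + 1 = ((dizi.length + 1 - k : Nat) : Int) := by omega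
    calc (PySem.List.pyRange 0 (k:Int) 1).foldl
          (fun c j => PySem.Int.floordiv (c * ((dizi.length : Int) - (k:Int) + 1 - j)) (j + 1)) 1
        = (PySem.List.pyRange 0 (k:Int) 1).foldl
          (fun c j => PySem.Int.floordiv (c * (((dizi.length + 1 - k : Nat) : Int) - j)) (j + 1)) 1 := by
          rw [ht]
      _ = ((Nat.choose (dizi.length + 1 - k) k : Nat) : Int) := pv_prod_choose _ k hk

-- ===== VERDICT (by name: the statement is the Claim_ definition above) =====
theorem s_spec : Claim_equal_s := by
  intro sayi dizi _ hpre
  unfold Pre_s at hpre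
  unfold Spec_s
  have hk : sayi = ((sayi.toNat : Nat) : Int) := by omega
  rw [hk, pv_s_eq_choose, pv_s_alt_eq_choose]
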